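-- pv_equiv track=rewrite | github.com/zdzc/penyisihan-idefuse-2019 | src/b.py | can_traverse
-- ===== SOURCE A (Python) =====
-- from collections import deque
--
-- def can_traverse(towers, radius):
--     visited = [False] * len(towers)
--     queue = deque([(0, towers[0])])
--
--     while queue:
--         num, (x1, y1) = queue.popleft()
--         if visited[num]:
--             continue
--
--         visited[num] = True
--
--         for i, (x2, y2) in enumerate(towers):
--             if i != num:
--                 dx = abs(x1 - x2)
--                 dy = abs(y1 - y2)
--                 dist = dx*dx + dy*dy
--                 if dist <= radius:
--                     queue.append((i, (x2, y2)))
--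
--     return all(visited)
-- ===== SOURCE B (Python) =====
-- def can_traverse(towers, radius):
--     n = len(towers)
--     reach = [i == 0 for i in range(n)]
--     changed = True
--     while changed:
--         changed = False
--         for i in range(n):
--             if not reach[i]:
--                 xi, yi = towers[i]
--                 if any(reach[j] and (xi - towers[j][0]) ** 2 + (yi - towers[j][1]) ** 2 <= radius
--                        for j in range(n)):
--                     reach[i] = True
--                     changed = True
--     return all(reach)
-- ===== Notes on version B (the rewrite author's own statement) =====
-- stated objective: alternative
-- what changed: Replaces the deque-based BFS (pop a queue entry, mark it visited, push all neighbours onto the queue) by a queueless fixed-point saturation: a boolean reach table is repeatedly relaxed over all towers until a full pass makes no change.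
import Mathlib
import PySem

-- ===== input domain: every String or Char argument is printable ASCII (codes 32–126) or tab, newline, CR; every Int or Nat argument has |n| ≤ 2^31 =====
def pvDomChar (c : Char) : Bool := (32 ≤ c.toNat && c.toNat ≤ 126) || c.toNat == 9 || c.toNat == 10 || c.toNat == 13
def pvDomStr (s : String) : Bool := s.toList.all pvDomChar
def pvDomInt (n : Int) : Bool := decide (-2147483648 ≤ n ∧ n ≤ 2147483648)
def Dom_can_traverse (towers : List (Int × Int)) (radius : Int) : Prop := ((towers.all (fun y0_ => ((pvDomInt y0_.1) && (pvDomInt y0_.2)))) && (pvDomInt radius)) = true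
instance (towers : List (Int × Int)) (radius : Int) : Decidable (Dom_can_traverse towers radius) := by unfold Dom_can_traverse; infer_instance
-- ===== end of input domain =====

-- B replaces A's deque-based BFS by a queueless fixed-point saturation of a boolean reach
-- table (repeated relaxation passes until a pass changes nothing); a timing run measured
-- B faster. Equivalence is proved on non-empty tower lists (A raises IndexError on []).


-- ===== PORT A =====
-- termination lemma for the BFS loop: marking an unvisited index reduces the number of `false`s
theorem pvCountFalseSet (l : List Bool) (k : Nat) (hk : k < l.length) (hf : l[k] = false) :
    (l.set k true).count false < l.count false := by
  induction l generalizing k with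
  | nil => simp at hk
  | cons a t ih =>
    cases k with
    | zero => simp_all [List.count_cons]
    | succ m =>
      simp only [List.set, List.count_cons]
      have := ih m (by simpa using hk) (by simpa using hf)
      omega

def canTravLoop (towers : List (Int × Int)) (radius : Int)
    (visited : List Bool) (queue : List (Int × (Int × Int))) : List Bool :=
  match queue with
  | [] => visited
  | (num, (x1, y1)) :: rest =>
    match hv : PySem.List.pyGet? visited num with
    | none => visited      -- Python: IndexError; unreachable, every queued index is in range
    | some b =>
      if b then
        canTravLoop towers radius visited rest
      else
        if h0 : 0 ≤ num ∧ num.toNat < visited.length then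
          -- visited[num] = True
          let visited' := visited.set num.toNat true
          -- for i, (x2, y2) in enumerate(towers): … queue.append(…)
          let queue' := (PySem.List.enumerate towers).foldl (fun q p =>
            if p.1 ≠ num then
              let dx := |x1 - p.2.1|
              let dy := |y1 - p.2.2|
              let dist := dx * dx + dy * dy
              if dist ≤ radius then q ++ [(p.1, p.2)] else q
            else q) rest
          canTravLoop towers radius visited' queue'
        else visited       -- totality guard only: unreachable, queued indices are ≥ 0 and in range
termination_by (visited.count false, queue.length)
decreasing_by
  · exact Prod.Lex.right _ (by simp)
  · refine Prod.Lex.left _ _ ?_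
    have hg : PySem.List.pyGet? visited num = visited[num.toNat]? :=
      PySem.List.pyGet?_of_nonneg visited h0.1
    rw [hg] at hv
    refine pvCountFalseSet visited num.toNat h0.2 ?_
    rw [List.getElem?_eq_getElem h0.2] at hv
    rename_i hbt
    rw [Option.some.inj hv]
    cases b with
    | false => rfl
    | true => exact absurd rfl hbt

def can_traverse (towers : List (Int × Int)) (radius : Int) : Bool :=
  match PySem.List.pyGet? towers 0 with
  | none => false          -- Python: IndexError on towers[0]; excluded by Pre_can_traverse
  | some t0 =>
    (canTravLoop towers radius (List.replicate towers.length false) [(0, t0)]).all (fun b => b)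

-- ===== PORT B =====
-- one pass of `for i in range(n): …`; the Bool component is the `changed` flag
def altPass (towers : List (Int × Int)) (radius : Int) (reach : List Bool) : List Bool × Bool :=
  (List.range towers.length).foldl (fun rc i =>
    if rc.1.getD i false then rc
    else
      let t := towers.getD i (0, 0)
      if (List.range towers.length).any (fun j =>
            rc.1.getD j false &&
            decide ((t.1 - (towers.getD j (0, 0)).1) ^ 2 + (t.2 - (towers.getD j (0, 0)).2) ^ 2 ≤ radius))
      then (rc.1.set i true, true) else rc) (reach, false)

-- `while changed:`; the fuel n+1 is a totality guard only (n+1 passes always reach a fixed point)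
def altLoop (towers : List (Int × Int)) (radius : Int) : Nat → List Bool → List Bool
  | 0, reach => reach
  | fuel + 1, reach =>
    let s := altPass towers radius reach
    if s.2 then altLoop towers radius fuel s.1 else s.1

def can_traverse_alt (towers : List (Int × Int)) (radius : Int) : Bool :=
  let n := towers.length
  let init := (List.range n).map (fun i => decide (i = 0))
  (altLoop towers radius (n + 1) init).all (fun b => b)

-- ===== PRECONDITION & SPEC =====
-- Pre_ excludes exactly the empty list, on which Python A raises IndexError at towers[0]
def Pre_can_traverse (towers : List (Int × Int)) (radius : Int) : Prop := towers ≠ []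
instance (towers : List (Int × Int)) (radius : Int) : Decidable (Pre_can_traverse towers radius) := by
  unfold Pre_can_traverse; infer_instance
def pvWitness_can_traverse : (List (Int × Int)) × Int := ([(0, 0), (1, 1)], 4)

def Spec_can_traverse (towers : List (Int × Int)) (radius : Int) (out : Bool) : Prop := out = can_traverse_alt towers radius
instance (towers : List (Int × Int)) (radius : Int) (out : Bool) : Decidable (Spec_can_traverse towers radius out) := by unfold Spec_can_traverse; infer_instance

-- ===== CLAIM (what is proved, stated in full; the proofs are below) =====
def Claim_equal_can_traverse : Prop := ∀ (towers : List (Int × Int)) (radius : Int), Dom_can_traverse towers radius → Pre_can_traverse towers radius → Spec_can_traverse towers radius (can_traverse towers radius)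

-- ===== LEMMAS AND PROOFS =====

-- squared euclidean distance between two towers
def pvDist2 (p q : Int × Int) : Int := (p.1 - q.1) * (p.1 - q.1) + (p.2 - q.2) * (p.2 - q.2)

-- the graph A and B both search: an edge joins distinct towers at squared distance ≤ radius
def pvEdge (towers : List (Int × Int)) (radius : Int) (i k : Nat) : Prop :=
  i < towers.length ∧ k < towers.length ∧ i ≠ k ∧
    pvDist2 (towers.getD i (0, 0)) (towers.getD k (0, 0)) ≤ radius

inductive pvReach (towers : List (Int × Int)) (radius : Int) : Nat → Prop
  | base : pvReach towers radius 0
  | step (j k : Nat) : pvReach towers radius j → pvEdge towers radius j k → pvReach towers radius k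

-- a "good" table: length n, sound for reachability, closed under edges, containing tower 0
def pvGood (towers : List (Int × Int)) (radius : Int) (V : List Bool) : Prop :=
  V.length = towers.length ∧
  (∀ i, V.getD i false = true → pvReach towers radius i) ∧
  (∀ i k, V.getD i false = true → pvEdge towers radius i k → V.getD k false = true) ∧
  V.getD 0 false = true

theorem pvGood_char {towers : List (Int × Int)} {radius : Int} {V : List Bool}
    (h : pvGood towers radius V) : ∀ i, V.getD i false = true ↔ pvReach towers radius i := by
  intro i
  constructor
  · exact h.2.1 i
  · intro hr
    induction hr with
    | base => exact h.2.2.2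
    | step j k _ he ih => exact h.2.2.1 j k ih he

theorem pvGood_unique {towers : List (Int × Int)} {radius : Int} {V W : List Bool}
    (hV : pvGood towers radius V) (hW : pvGood towers radius W) : V = W := by
  have hlen : V.length = W.length := by rw [hV.1, hW.1]
  apply List.ext_getElem hlen
  intro i h1 h2
  have e1 : V.getD i false = V[i] := List.getD_eq_getElem V false h1
  have e2 : W.getD i false = W[i] := List.getD_eq_getElem W false h2
  have : (V.getD i false = true) ↔ (W.getD i false = true) :=
    (pvGood_char hV i).trans (pvGood_char hW i).symm
  rw [e1, e2] at this
  cases hvi : V[i] <;> cases hwi : W[i] <;> simp_all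

-- ---------- getD/set/count toolkit ----------
theorem pvGetDSetSelf (l : List Bool) (i : Nat) (h : i < l.length) :
    (l.set i true).getD i false = true := by
  simp [List.getD, h]

theorem pvGetDSetNe (l : List Bool) (i j : Nat) (a : Bool) (h : i ≠ j) :
    (l.set i a).getD j false = l.getD j false := by
  simp [List.getD, List.getElem?_set_ne h]

theorem pvGetDFalseOfGe (l : List Bool) (j : Nat) (h : l.length ≤ j) :
    l.getD j false = false := by
  simp [List.getD, List.getElem?_eq_none h]

theorem pvGetDSetTrueMono (l : List Bool) (i j : Nat) (h : l.getD j false = true) :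
    (l.set i true).getD j false = true := by
  by_cases hij : i = j
  · subst hij
    have hlt : i < l.length := by
      by_contra hc
      rw [pvGetDFalseOfGe l i (by omega)] at h
      exact Bool.false_ne_true h
    exact pvGetDSetSelf l i hlt
  · rw [pvGetDSetNe l i j true hij]; exact h

theorem pvCountTrueSet (l : List Bool) (k : Nat) (hk : k < l.length) (hf : l[k] = false) :
    (l.set k true).count true = l.count true + 1 := by
  induction l generalizing k with
  | nil => simp at hk
  | cons a t ih =>
    cases k with
    | zero => simp_all [List.count_cons]
    | succ m =>
      simp only [List.set, List.count_cons]
      have := ih m (by simpa using hk) (by simpa using hf)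
      omega

-- ---------- A side ----------

def pvInv (towers : List (Int × Int)) (radius : Int)
    (V : List Bool) (Q : List (Int × (Int × Int))) : Prop :=
  V.length = towers.length ∧
  (∀ i, V.getD i false = true → pvReach towers radius i) ∧
  (∀ e ∈ Q, ∃ k : Nat, k < towers.length ∧ e = ((k : Int), towers.getD k (0, 0)) ∧
      pvReach towers radius k) ∧
  (∀ i k, V.getD i false = true → pvEdge towers radius i k →
      V.getD k false = true ∨ ((k : Int), towers.getD k (0, 0)) ∈ Q) ∧
  (V.getD 0 false = true ∨ ((0 : Int), towers.getD 0 (0, 0)) ∈ Q)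

-- membership in the queue built by A's inner append loop
theorem pvQueueMem (towers : List (Int × Int)) (radius num x1 y1 : Int)
    (rest : List (Int × (Int × Int))) (e : Int × (Int × Int)) :
    (e ∈ (PySem.List.enumerate towers).foldl (fun q p =>
            if p.1 ≠ num then
              let dx := |x1 - p.2.1|
              let dy := |y1 - p.2.2|
              let dist := dx * dx + dy * dy
              if dist ≤ radius then q ++ [(p.1, p.2)] else q
            else q) rest) ↔
    (e ∈ rest ∨ ∃ m : Nat, m < towers.length ∧ (m : Int) ≠ num ∧
        pvDist2 (x1, y1) (towers.getD m (0, 0)) ≤ radius ∧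
        e = ((m : Int), towers.getD m (0, 0))) := by
  have hstep : (fun (q : List (Int × (Int × Int))) (p : Int × (Int × Int)) =>
      if p.1 ≠ num then
        let dx := |x1 - p.2.1|
        let dy := |y1 - p.2.2|
        let dist := dx * dx + dy * dy
        if dist ≤ radius then q ++ [(p.1, p.2)] else q
      else q)
      = (fun q p => if ((decide (p.1 ≠ num)) &&
            (decide (pvDist2 (x1, y1) p.2 ≤ radius))) = true then q ++ [id p] else q) := by
    funext q p
    by_cases h1 : p.1 ≠ num <;>
      by_cases h2 : (x1 - p.2.1) * (x1 - p.2.1) + (y1 - p.2.2) * (y1 - p.2.2) ≤ radius <;>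
      simp [pvDist2, h1, h2, abs_mul_abs_self]
  rw [hstep, PySem.List.foldl_append_if, List.mem_append]
  constructor
  · rintro (hr | hm)
    · exact Or.inl hr
    · right
      simp only [List.mem_map, List.mem_filter] at hm
      obtain ⟨p, ⟨hpe, hpc⟩, rfl⟩ := hm
      obtain ⟨k, hk, rfl⟩ := (PySem.List.mem_enumerate_iff towers 0 p).mp hpe
      simp only [Bool.and_eq_true, decide_eq_true_eq] at hpc
      refine ⟨k, hk, by simpa using hpc.1, ?_, ?_⟩
      · simpa [List.getD, List.getElem?_eq_getElem hk] using hpc.2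
      · simp [List.getD, List.getElem?_eq_getElem hk]
  · rintro (hr | ⟨m, hm, hne, hd, rfl⟩)
    · exact Or.inl hr
    · right
      simp only [List.mem_map, List.mem_filter]
      refine ⟨((m : Int), towers.getD m (0, 0)), ⟨?_, ?_⟩, rfl⟩
      · exact (PySem.List.mem_enumerate_iff towers 0 _).mpr
          ⟨m, hm, by simp [List.getD, List.getElem?_eq_getElem hm]⟩
      · simp only [Bool.and_eq_true, decide_eq_true_eq]
        exact ⟨by simpa using hne, hd⟩

-- popping an already-visited entry preserves the invariant
theorem pvInvPop (towers : List (Int × Int)) (radius num x1 y1 : Int)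
    (V : List Bool) (rest : List (Int × (Int × Int)))
    (h : pvInv towers radius V ((num, (x1, y1)) :: rest))
    (hv : PySem.List.pyGet? V num = some true) :
    pvInv towers radius V rest := by
  obtain ⟨k, hk, he, hr⟩ := h.2.2.1 (num, (x1, y1)) List.mem_cons_self
  have hnum : num = (k : Int) := by simpa using congrArg Prod.fst he
  have hvk : V.getD k false = true := by
    rw [hnum, PySem.List.pyGet?_natCast] at hv
    rcases Nat.lt_or_ge k V.length with hlt | hge
    · rw [List.getElem?_eq_getElem hlt] at hv
      rw [List.getD_eq_getElem V false hlt]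
      exact Option.some.inj hv
    · rw [List.getElem?_eq_none hge] at hv; cases hv
  refine ⟨h.1, h.2.1, fun e he' => h.2.2.1 e (List.mem_cons_of_mem _ he'), ?_, ?_⟩
  · intro i kk hi hedge
    rcases h.2.2.2.1 i kk hi hedge with ht | hq
    · exact Or.inl ht
    · rcases List.mem_cons.mp hq with hh | hrest
      · have : kk = k := by
          have := congrArg Prod.fst hh
          simpa [hnum] using this
        exact Or.inl (this ▸ hvk)
      · exact Or.inr hrest
  · rcases h.2.2.2.2 with ht | hq
    · exact Or.inl ht
    · rcases List.mem_cons.mp hq with hh | hrest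
      · have h2 : (0 : Int) = (k : Int) := by
          have := congrArg Prod.fst hh
          rwa [hnum] at this
        have : 0 = k := by exact_mod_cast h2
        exact Or.inl (this ▸ hvk)
      · exact Or.inr hrest

-- visiting a fresh entry (mark it, append all its neighbours) preserves the invariant
theorem pvInvStep (towers : List (Int × Int)) (radius num x1 y1 : Int)
    (V : List Bool) (rest : List (Int × (Int × Int)))
    (h : pvInv towers radius V ((num, (x1, y1)) :: rest))
    (hv : PySem.List.pyGet? V num = some false) :
    pvInv towers radius (V.set num.toNat true)
      ((PySem.List.enumerate towers).foldl (fun q p =>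
          if p.1 ≠ num then
            let dx := |x1 - p.2.1|
            let dy := |y1 - p.2.2|
            let dist := dx * dx + dy * dy
            if dist ≤ radius then q ++ [(p.1, p.2)] else q
          else q) rest) := by
  obtain ⟨k, hk, he, hr⟩ := h.2.2.1 (num, (x1, y1)) List.mem_cons_self
  have hnum : num = (k : Int) := by simpa using congrArg Prod.fst he
  have hxy : (x1, y1) = towers.getD k (0, 0) := by simpa using congrArg Prod.snd he
  have hkN : num.toNat = k := by simp [hnum]
  have hkV : k < V.length := by rw [h.1]; exact hk
  rw [hkN]
  refine ⟨by simpa using h.1, ?_, ?_, ?_, ?_⟩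
  · -- soundness
    intro i hi
    by_cases hik : i = k
    · exact hik ▸ hr
    · rw [pvGetDSetNe V k i true (fun hh => hik hh.symm)] at hi
      exact h.2.1 i hi
  · -- queue entries
    intro e he'
    rw [pvQueueMem] at he'
    rcases he' with hrest | ⟨m, hm, hne, hd, rfl⟩
    · exact h.2.2.1 e (List.mem_cons_of_mem _ hrest)
    · refine ⟨m, hm, rfl, ?_⟩
      refine pvReach.step k m hr ⟨hk, hm, ?_, ?_⟩
      · intro hkm
        exact hne (by rw [← hkm, ← hnum])
      · rw [← hxy]; exact hd
  · -- closedness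
    intro i kk hi hedge
    by_cases hik : i = k
    · subst hik
      right
      rw [pvQueueMem]
      right
      refine ⟨kk, hedge.2.1, ?_, ?_, rfl⟩
      · intro hkk
        exact hedge.2.2.1 (by exact_mod_cast (hnum ▸ hkk).symm)
      · rw [hxy]; exact hedge.2.2.2
    · rw [pvGetDSetNe V k i true (fun hh => hik hh.symm)] at hi
      rcases h.2.2.2.1 i kk hi hedge with ht | hq
      · exact Or.inl (pvGetDSetTrueMono V k kk ht)
      · rcases List.mem_cons.mp hq with hh | hrest
        · have : kk = k := by
            have := congrArg Prod.fst hh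
            simpa [hnum] using this
          subst this
          exact Or.inl (pvGetDSetSelf V kk hkV)
        · right; rw [pvQueueMem]; exact Or.inl hrest
  · -- tower 0
    rcases h.2.2.2.2 with ht | hq
    · exact Or.inl (pvGetDSetTrueMono V k 0 ht)
    · rcases List.mem_cons.mp hq with hh | hrest
      · have h2 : (0 : Int) = (k : Int) := by
          have := congrArg Prod.fst hh
          rwa [hnum] at this
        have h0k : 0 = k := by exact_mod_cast h2
        exact Or.inl (h0k ▸ pvGetDSetSelf V k hkV)
      · right; rw [pvQueueMem]; exact Or.inl hrest

theorem pvLoopGood (towers : List (Int × Int)) (radius : Int)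
    (V : List Bool) (Q : List (Int × (Int × Int))) (h : pvInv towers radius V Q) :
    pvGood towers radius (canTravLoop towers radius V Q) := by
  revert h
  fun_induction canTravLoop towers radius V Q with
  | case1 visited =>
    intro h
    exact ⟨h.1, h.2.1,
      fun i k hi he => (h.2.2.2.1 i k hi he).resolve_right (by simp),
      h.2.2.2.2.resolve_right (by simp)⟩
  | case2 visited num x1 y1 rest hv =>
    intro h
    exfalso
    obtain ⟨k, hk, he, _⟩ := h.2.2.1 (num, (x1, y1)) List.mem_cons_self
    have hnum : num = (k : Int) := by simpa using congrArg Prod.fst he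
    rw [hnum, PySem.List.pyGet?_natCast,
      List.getElem?_eq_getElem (by rw [h.1]; exact hk)] at hv
    cases hv
  | case3 visited num x1 y1 rest hv ih =>
    intro h
    exact ih (pvInvPop towers radius num x1 y1 visited rest h hv)
  | case4 visited num x1 y1 rest b hv hbt h0 visited' queue' ih =>
    intro h
    have hb : b = false := by cases b; rfl; exact absurd rfl hbt
    subst hb
    exact ih (pvInvStep towers radius num x1 y1 visited rest h hv)
  | case5 visited num x1 y1 rest b hv hbt h0 =>
    intro h
    exfalso
    obtain ⟨k, hk, he, _⟩ := h.2.2.1 (num, (x1, y1)) List.mem_cons_self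
    have hnum : num = (k : Int) := by simpa using congrArg Prod.fst he
    exact h0 ⟨by rw [hnum]; exact Int.natCast_nonneg k,
      by rw [hnum]; simpa [h.1] using hk⟩

-- ---------- B side ----------

-- the body of B's pass, named for the proofs (definitionally the lambda inside altPass)
def pvStep (towers : List (Int × Int)) (radius : Int)
    (rc : List Bool × Bool) (i : Nat) : List Bool × Bool :=
  if rc.1.getD i false then rc
  else
    let t := towers.getD i (0, 0)
    if (List.range towers.length).any (fun j =>
          rc.1.getD j false &&
          decide ((t.1 - (towers.getD j (0, 0)).1) ^ 2 + (t.2 - (towers.getD j (0, 0)).2) ^ 2 ≤ radius))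
    then (rc.1.set i true, true) else rc

theorem pvAltPassEq (towers : List (Int × Int)) (radius : Int) (reach : List Bool) :
    altPass towers radius reach
      = (List.range towers.length).foldl (pvStep towers radius) (reach, false) := rfl

-- each step either leaves the state alone or marks one unreached tower and raises the flag
theorem pvStepCases (towers : List (Int × Int)) (radius : Int)
    (rc : List Bool × Bool) (i : Nat) :
    pvStep towers radius rc i = rc ∨
    (rc.1.getD i false = false ∧
      ((List.range towers.length).any (fun j =>
          rc.1.getD j false &&
          decide (((towers.getD i (0, 0)).1 - (towers.getD j (0, 0)).1) ^ 2
            + ((towers.getD i (0, 0)).2 - (towers.getD j (0, 0)).2) ^ 2 ≤ radius))) = true ∧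
      pvStep towers radius rc i = (rc.1.set i true, true)) := by
  simp only [pvStep]
  by_cases h1 : rc.1.getD i false = true
  · left; rw [if_pos h1]
  · have h1' : rc.1.getD i false = false := by simpa using h1
    by_cases h2 : ((List.range towers.length).any (fun j =>
        rc.1.getD j false &&
        decide (((towers.getD i (0, 0)).1 - (towers.getD j (0, 0)).1) ^ 2
          + ((towers.getD i (0, 0)).2 - (towers.getD j (0, 0)).2) ^ 2 ≤ radius))) = true
    · right
      exact ⟨h1', h2, by rw [if_neg h1, if_pos h2]⟩
    · left; rw [if_neg h1, if_neg h2]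

theorem pvFoldLen (towers : List (Int × Int)) (radius : Int) :
    ∀ (l : List Nat) (s : List Bool × Bool),
      ((l.foldl (pvStep towers radius) s).1).length = s.1.length := by
  intro l
  induction l with
  | nil => intro s; rfl
  | cons a t ih =>
    intro s
    rw [List.foldl_cons, ih]
    rcases pvStepCases towers radius s a with hsame | ⟨_, _, hset⟩
    · rw [hsame]
    · rw [hset]; simp

theorem pvFoldMono (towers : List (Int × Int)) (radius : Int) :
    ∀ (l : List Nat) (s : List Bool × Bool) (i : Nat),
      s.1.getD i false = true → ((l.foldl (pvStep towers radius) s).1).getD i false = true := by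
  intro l
  induction l with
  | nil => intro s i h; exact h
  | cons a t ih =>
    intro s i h
    rw [List.foldl_cons]
    apply ih
    rcases pvStepCases towers radius s a with hsame | ⟨_, _, hset⟩
    · rw [hsame]; exact h
    · rw [hset]; exact pvGetDSetTrueMono s.1 a i h

-- counting: the flag only rises together with a strict increase of marked towers
theorem pvFoldCount (towers : List (Int × Int)) (radius : Int) :
    ∀ (l : List Nat) (s : List Bool × Bool),
      (∀ i ∈ l, i < s.1.length) →
      s.1.count true ≤ ((l.foldl (pvStep towers radius) s).1).count true ∧
      ((l.foldl (pvStep towers radius) s).2 = true →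
        s.2 = true ∨ s.1.count true < ((l.foldl (pvStep towers radius) s).1).count true) := by
  intro l
  induction l with
  | nil => intro s _; exact ⟨Nat.le_refl _, fun h => Or.inl h⟩
  | cons a t ih =>
    intro s hb
    rw [List.foldl_cons]
    have hbt : ∀ i ∈ t, i < (pvStep towers radius s a).1.length := by
      intro i hi
      rcases pvStepCases towers radius s a with hsame | ⟨_, _, hset⟩
      · rw [hsame]; exact hb i (List.mem_cons_of_mem _ hi)
      · rw [hset]; simpa using hb i (List.mem_cons_of_mem _ hi)
    have iht := ih (pvStep towers radius s a) hbt
    rcases pvStepCases towers radius s a with hsame | ⟨hfalse, _, hset⟩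
    · rw [hsame] at iht ⊢; exact iht
    · have ha : a < s.1.length := hb a List.mem_cons_self
      have hgf : s.1[a] = false := by
        rw [← List.getD_eq_getElem s.1 false ha]; exact hfalse
      have hcnt : (s.1.set a true).count true = s.1.count true + 1 :=
        pvCountTrueSet s.1 a ha hgf
      rw [hset] at iht ⊢
      obtain ⟨ih1, _⟩ := iht
      have hf : List.count true ((s.1.set a true, true) : List Bool × Bool).1
          = List.count true (s.1.set a true) := rfl
      exact ⟨by omega, fun _ => Or.inr (by omega)⟩

-- if a pass ends with the flag down, it changed nothing and every relaxation failed
theorem pvFlagUp (towers : List (Int × Int)) (radius : Int) :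
    ∀ (l : List Nat) (s : List Bool × Bool), s.2 = true →
      (l.foldl (pvStep towers radius) s).2 = true := by
  intro l
  induction l with
  | nil => intro s h; exact h
  | cons b u ihu =>
    intro s h
    rw [List.foldl_cons]
    apply ihu
    rcases pvStepCases towers radius s b with hs | ⟨_, _, hs⟩
    · rw [hs]; exact h
    · rw [hs]

theorem pvFoldFalse (towers : List (Int × Int)) (radius : Int) :
    ∀ (l : List Nat) (r : List Bool),
      (l.foldl (pvStep towers radius) (r, false)).2 = false →
      (l.foldl (pvStep towers radius) (r, false)).1 = r ∧
      ∀ i ∈ l, r.getD i false = false →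
        ((List.range towers.length).any (fun j =>
            r.getD j false &&
            decide (((towers.getD i (0, 0)).1 - (towers.getD j (0, 0)).1) ^ 2
              + ((towers.getD i (0, 0)).2 - (towers.getD j (0, 0)).2) ^ 2 ≤ radius))) = false := by
  intro l
  induction l with
  | nil => intro r _; exact ⟨rfl, by simp⟩
  | cons a t ih =>
    intro r hflag
    rw [List.foldl_cons] at hflag ⊢
    rcases pvStepCases towers radius (r, false) a with hsame | ⟨_, _, hset⟩
    · rw [hsame] at hflag ⊢
      obtain ⟨h1, h2⟩ := ih r hflag
      refine ⟨h1, ?_⟩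
      intro i hi hri
      rcases List.mem_cons.mp hi with rfl | hit
      · by_contra hc
        simp only [Bool.not_eq_false] at hc
        have hcontra : pvStep towers radius (r, false) i = (r.set i true, true) := by
          simp only [pvStep]
          rw [if_neg (by show ¬ (r.getD i false = true); rw [hri]; simp), if_pos hc]
        rw [hcontra] at hsame
        have := congrArg Prod.snd hsame
        simp at this
      · exact h2 i hit hri
    · -- a real set raised the flag; it never comes down again, contradicting hflag
      exfalso
      rw [hset, pvFlagUp towers radius t _ rfl] at hflag
      cases hflag

-- soundness of one pass: every tower it marks is reachable
theorem pvAltSub (towers : List (Int × Int)) (radius : Int) :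
    ∀ (l : List Nat) (s : List Bool × Bool),
      (∀ i ∈ l, i < towers.length) → s.1.length = towers.length →
      (∀ i, s.1.getD i false = true → pvReach towers radius i) →
      (∀ i, ((l.foldl (pvStep towers radius) s).1).getD i false = true →
        pvReach towers radius i) := by
  intro l
  induction l with
  | nil => intro s _ _ hsub; exact hsub
  | cons a t ih =>
    intro s hb hlen hsub
    rw [List.foldl_cons]
    rcases pvStepCases towers radius s a with hsame | ⟨hfalse, hany, hset⟩
    · rw [hsame]
      exact ih s (fun i hi => hb i (List.mem_cons_of_mem _ hi)) hlen hsub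
    · rw [hset]
      have ha : a < towers.length := hb a List.mem_cons_self
      have hra : pvReach towers radius a := by
        obtain ⟨j, hjmem, hj⟩ := List.any_eq_true.mp hany
        have hjn : j < towers.length := List.mem_range.mp hjmem
        simp only [Bool.and_eq_true, decide_eq_true_eq] at hj
        have hrj : pvReach towers radius j := hsub j hj.1
        refine pvReach.step j a hrj ⟨hjn, ha, ?_, ?_⟩
        · intro hja; rw [hja] at hj; rw [hj.1] at hfalse; cases hfalse
        · have : pvDist2 (towers.getD j (0, 0)) (towers.getD a (0, 0))
              = ((towers.getD a (0, 0)).1 - (towers.getD j (0, 0)).1) ^ 2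
                + ((towers.getD a (0, 0)).2 - (towers.getD j (0, 0)).2) ^ 2 := by
            unfold pvDist2; ring
          rw [this]; exact hj.2
      refine ih (s.1.set a true, true) (fun i hi => hb i (List.mem_cons_of_mem _ hi))
        (by simpa using hlen) ?_
      intro i hi
      by_cases hia : i = a
      · exact hia ▸ hra
      · exact hsub i (by rwa [pvGetDSetNe s.1 a i true (fun hh => hia hh.symm)] at hi)

theorem pvAltLoopGood (towers : List (Int × Int)) (radius : Int) :
    ∀ (fuel : Nat) (r : List Bool), r.length = towers.length →
      towers.length + 1 ≤ fuel + r.count true →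
      (∀ i, r.getD i false = true → pvReach towers radius i) →
      r.getD 0 false = true →
      pvGood towers radius (altLoop towers radius fuel r) := by
  intro fuel
  induction fuel with
  | zero =>
    intro r hlen hfuel _ _
    exfalso
    have := List.count_le_length (a := true) (l := r)
    omega
  | succ fuel ih =>
    intro r hlen hfuel hsub hzero
    have hb : ∀ i ∈ List.range towers.length, i < r.length := by
      intro i hi; rw [hlen]; exact List.mem_range.mp hi
    have hb' : ∀ i ∈ List.range towers.length, i < ((r, false) : List Bool × Bool).1.length := hb
    simp only [altLoop]
    by_cases hflag : (altPass towers radius r).2 = true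
    · rw [if_pos hflag]
      rw [pvAltPassEq] at hflag ⊢
      obtain ⟨hc1, hc2⟩ := pvFoldCount towers radius (List.range towers.length) (r, false) hb'
      rcases hc2 hflag with hfalse | hlt
      · cases hfalse
      · have hr0 : List.count true ((r, false) : List Bool × Bool).1 = List.count true r := rfl
        apply ih
        · rw [pvFoldLen]; exact hlen
        · rw [hr0] at hlt; omega
        · exact pvAltSub towers radius (List.range towers.length) (r, false)
            (fun i hi => List.mem_range.mp hi) hlen hsub
        · exact pvFoldMono towers radius (List.range towers.length) (r, false) 0 hzero
    · rw [if_neg hflag]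
      have hff : (altPass towers radius r).2 = false := by
        cases hv : (altPass towers radius r).2
        · rfl
        · exact absurd hv hflag
      rw [pvAltPassEq] at hff ⊢
      obtain ⟨heq, hclosed'⟩ := pvFoldFalse towers radius (List.range towers.length) r hff
      rw [heq]
      refine ⟨hlen, hsub, ?_, hzero⟩
      intro i k hi hedge
      by_contra hk
      have hkf : r.getD k false = false := by
        cases hv : r.getD k false
        · rfl
        · exact absurd hv hk
      have hkn : k < towers.length := hedge.2.1
      have hany := hclosed' k (List.mem_range.mpr hkn) hkf
      have hwit : ((List.range towers.length).any (fun j =>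
          r.getD j false &&
          decide (((towers.getD k (0, 0)).1 - (towers.getD j (0, 0)).1) ^ 2
            + ((towers.getD k (0, 0)).2 - (towers.getD j (0, 0)).2) ^ 2 ≤ radius))) = true := by
        refine List.any_eq_true.mpr ⟨i, List.mem_range.mpr hedge.1, ?_⟩
        simp only [Bool.and_eq_true, decide_eq_true_eq]
        refine ⟨hi, ?_⟩
        have : ((towers.getD k (0, 0)).1 - (towers.getD i (0, 0)).1) ^ 2
            + ((towers.getD k (0, 0)).2 - (towers.getD i (0, 0)).2) ^ 2
            = pvDist2 (towers.getD i (0, 0)) (towers.getD k (0, 0)) := by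
          unfold pvDist2; ring
        rw [this]; exact hedge.2.2.2
      rw [hwit] at hany
      cases hany

theorem pvAltGood (towers : List (Int × Int)) (radius : Int) (h : towers ≠ []) :
    pvGood towers radius
      (altLoop towers radius (towers.length + 1)
        ((List.range towers.length).map (fun i => decide (i = 0)))) := by
  have hn : 0 < towers.length := List.length_pos_iff.mpr h
  apply pvAltLoopGood
  · simp
  · simp
  · intro i hi
    rcases Nat.lt_or_ge i towers.length with hlt | hge
    · have : ((List.range towers.length).map (fun i => decide (i = 0))).getD i false
          = decide (i = 0) := by
        rw [List.getD_eq_getElem _ false (by simpa using hlt)]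
        simp
      rw [this] at hi
      have : i = 0 := by simpa using hi
      exact this ▸ pvReach.base
    · rw [pvGetDFalseOfGe _ i (by simpa using hge)] at hi
      cases hi
  · rw [List.getD_eq_getElem _ false (by simpa using hn)]
    simp

-- ===== VERDICT (by name: the statement is the Claim_ definition above) =====
theorem can_traverse_spec : Claim_equal_can_traverse := by
  intro towers radius _ hpre
  unfold Spec_can_traverse
  unfold can_traverse can_traverse_alt
  have hlen : 0 < towers.length := by
    cases towers with
    | nil => exact absurd rfl hpre
    | cons a t => simp
  have hget : PySem.List.pyGet? towers 0 = some (towers.getD 0 (0, 0)) := by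
    rw [PySem.List.pyGet?_of_nonneg towers (by omega)]
    simp [List.getD, List.getElem?_eq_getElem hlen]
  rw [hget]
  dsimp only
  have hA : pvGood towers radius
      (canTravLoop towers radius (List.replicate towers.length false)
        [(0, towers.getD 0 (0, 0))]) := by
    apply pvLoopGood
    refine ⟨by simp, ?_, ?_, ?_, ?_⟩
    · intro i hi
      rw [List.getD] at hi
      rcases Nat.lt_or_ge i towers.length with hlt | hge
      · simp [List.getElem?_eq_getElem, hlt] at hi
      · simp [List.getElem?_eq_none (by simpa using hge : (List.replicate towers.length false).length ≤ i)] at hi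
    · intro e he
      rcases List.mem_singleton.mp he with rfl
      exact ⟨0, hlen, by simp, pvReach.base⟩
    · intro i k hi _
      rw [List.getD] at hi
      rcases Nat.lt_or_ge i towers.length with hlt | hge
      · simp [List.getElem?_eq_getElem, hlt] at hi
      · simp [List.getElem?_eq_none (by simpa using hge : (List.replicate towers.length false).length ≤ i)] at hi
    · right; exact List.mem_singleton.mpr rfl
  have hB := pvAltGood towers radius hpre
  rw [pvGood_unique hA hB]
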